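-- pv_equiv track=rewrite | github.com/michael-ren/tagnote | tagnote/tag.py | split_timestamp
-- ===== SOURCE A (Python) =====
-- from collections import OrderedDict, deque
-- from typing import (
--     Sequence, Iterator, Iterable, Optional, Any, TextIO, Pattern, Type, Tuple,
--     NamedTuple, Callable, Union
-- )
--
-- class TagError(Exception):
--     EXIT_USAGE = 2
--
--     EXIT_CONFIG_REQUIRED_PROPERTY = 11
--
--     EXIT_CONFIG_CONSTRUCTOR_FAILED = 12
--
--     EXIT_CONFIG_CHECK_FAILED = 13
--
--     EXIT_DIRECTORY_NOT_FOUND = 21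
--
--     EXIT_UNSUPPORTED_OPERATION = 22
--
--     EXIT_NOTE_NOT_EXISTS = 23
--
--     EXIT_NOTE_EXISTS = 24
--
--     EXIT_LABEL_NOT_EXISTS = 25
--
--     EXIT_BAD_NAME = 26
--
--     EXIT_BAD_RANGE = 27
--
--     EXIT_BAD_REGEX = 28
--
--     EXIT_EDITOR_FAILED = 29
--
--     EXIT_EXISTING_MAPPINGS = 30
--
--     EXIT_IMPORT_FILE_NOT_EXISTS = 31
--
--     EXIT_BAD_PERMISSIONS = 32
--
--     EXIT_BAD_ORDER = 33
--
--     EXIT_BAD_TAG_TYPE = 34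
--
--     EXIT_BAD_TIMESTAMP = 35
--
--     EXIT_BAD_DATE_PATTERN = 36
--
--     EXIT_BAD_DATE_RANGE = 37
--
--     def __init__(self, message: str, exit_status: int) -> None:
--         super().__init__(message)
--         self.exit_status = exit_status
--
-- def split_timestamp(timestamp: str) -> Sequence[str]:
--     delimiters = ["-", "-", "_", "-", "-"]
--     split = deque([timestamp])  # type: deque
--
--     def raise_error() -> TagError:
--         raise TagError(
--             "Bad timestamp: {}".format(timestamp),
--             TagError.EXIT_BAD_TIMESTAMP
--         )
--
--     for delimiter in delimiters:
--         rest = split.pop()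
--         rest_split = rest.split(delimiter, 1)
--         if not rest_split[0]:
--             raise_error()
--         for outlier in set(delimiters).difference({delimiter}):
--             if outlier in rest_split[0]:
--                 raise_error()
--         if len(rest_split) == 2:
--             split.extend([rest_split[0], rest_split[1]])
--         elif len(rest_split) == 1:
--             split.append(rest_split[0])
--             break
--         else:
--             raise_error()
--     for delimiter in set(delimiters):
--         if delimiter in split[-1]:
--             raise_error()
--     return list(split)
-- ===== SOURCE B (Python) =====
-- class TagError(Exception):
--     EXIT_BAD_TIMESTAMP = 35
--
--     def __init__(self, message: str, exit_status: int) -> None: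
--         super().__init__(message)
--         self.exit_status = exit_status
--
--
-- # One left-to-right scan splits the string into tokens and the delimiter
-- # sequence; validity is then a prefix check plus non-emptiness of tokens.
-- def split_timestamp(timestamp: str):
--     pattern = ["-", "-", "_", "-", "-"]
--     tokens = []
--     delims = []
--     cur = []
--     for ch in timestamp:
--         if ch == "-" or ch == "_":
--             delims.append(ch)
--             tokens.append("".join(cur))
--             cur = []
--         else:
--             cur.append(ch)
--     tokens.append("".join(cur))
--     if (len(delims) > 5 or delims != pattern[:len(delims)]
--             or any(not t for t in tokens)):
--         raise TagError(
--             "Bad timestamp: {}".format(timestamp),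
--             TagError.EXIT_BAD_TIMESTAMP
--         )
--     return tokens
-- ===== Notes on version B (the rewrite author's own statement) =====
-- stated objective: simpler
-- what changed: Replaced A's deque-based repeated pop-and-resplit loop (str.split once per expected delimiter, with per-step outlier substring checks) by a single left-to-right character scan that collects tokens and the delimiter sequence, followed by one prefix-of-pattern check and a non-emptiness check of the tokens.
-- outside the precondition, e.g. on split_timestamp('a-b-c_d-e-'): A returns ['a', 'b', 'c', 'd', 'e', ''], B raises TagError
import Mathlib
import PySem

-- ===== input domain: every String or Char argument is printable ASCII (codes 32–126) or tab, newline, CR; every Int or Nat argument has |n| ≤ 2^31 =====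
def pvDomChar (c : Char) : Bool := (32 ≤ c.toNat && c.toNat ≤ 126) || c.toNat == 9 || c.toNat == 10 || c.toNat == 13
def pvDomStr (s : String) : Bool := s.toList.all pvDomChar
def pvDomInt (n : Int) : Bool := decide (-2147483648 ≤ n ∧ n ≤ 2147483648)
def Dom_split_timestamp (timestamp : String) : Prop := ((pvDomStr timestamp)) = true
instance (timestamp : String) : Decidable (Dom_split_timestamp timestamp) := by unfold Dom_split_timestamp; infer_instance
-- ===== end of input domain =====

-- B replaces A's deque pop-and-resplit loop by one character scan plus a prefix check (simpler);
-- the equivalence is about the RETURN value on Pre_ (where the Pythons raise TagError the ports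
-- return the [] placeholder, excluded by Pre_).

-- ===== PORT A =====
-- `rest.split(delimiter, 1)`: split at the first occurrence of the (single-char) delimiter;
-- (before, some after), or (whole, none) when the delimiter does not occur — exact for 1-char sep.
def pvSplitOnce (d : Char) : List Char → List Char × Option (List Char)
  | [] => ([], none)
  | c :: cs =>
    if c = d then ([], some cs)
    else
      let r := pvSplitOnce d cs
      (c :: r.1, r.2)

-- The deque is kept right-to-left (head = Python's split[-1]); pop/extend/append act on the head.
-- `none` = the explicit `raise_error()` (TagError).  `outlier in rest_split[0]` is char membership
-- since every outlier is a single character; the `.any` consumes the set order-independently.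
def pvLoopA : List Char → List (List Char) → Option (List (List Char))
  | [], rsplit => some rsplit
  | d :: ds, rsplit =>
    match rsplit with
    | [] => none   -- pop from empty deque (never reached: the deque stays nonempty)
    | rest :: stack =>
      let rs := pvSplitOnce d rest
      if rs.1 = [] then none
      else if (PySem.Set.diff (PySem.Set.ofList ['-', '-', '_', '-', '-']) [d]).any
          (fun o => o ∈ rs.1) then none
      else
        match rs.2 with
        | some second => pvLoopA ds (second :: rs.1 :: stack)
        | none => some (rs.1 :: stack)   -- break

-- the final `for delimiter in set(delimiters): if delimiter in split[-1]` check, then list(split)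
def pvFinishA (rsplit : List (List Char)) : Option (List String) :=
  match rsplit with
  | [] => none
  | last :: _ =>
    if (PySem.Set.ofList ['-', '-', '_', '-', '-']).any (fun c => c ∈ last) then none
    else some (rsplit.reverse.map (fun l => String.mk l))

def split_timestamp (timestamp : String) : List String :=
  ((pvLoopA ['-', '-', '_', '-', '-'] [timestamp.toList]).bind pvFinishA).getD []

-- ===== PORT B =====
-- one scan; state = (finished tokens, current token `cur`, delimiters seen).
-- On a delimiter: close `cur` (Python's `"".join(cur)`) and record the delimiter;
-- otherwise `cur.append(ch)`.
def pvStepB (st : List (List Char) × List Char × List Char) (ch : Char) :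
    List (List Char) × List Char × List Char :=
  if ch = '-' ∨ ch = '_' then (st.1 ++ [st.2.1], [], st.2.2 ++ [ch])
  else (st.1, st.2.1 ++ [ch], st.2.2)

def split_timestamp_alt (timestamp : String) : List String :=
  let pattern : List Char := ['-', '-', '_', '-', '-']
  let st := timestamp.toList.foldl pvStepB ([], [], [])
  let tokens := st.1 ++ [st.2.1]
  let delims := st.2.2
  if delims.length > 5 ∨ delims ≠ pattern.take delims.length ∨ tokens.any (fun t => t = []) then
    []   -- raise TagError
  else
    tokens.map (fun l => String.mk l)

-- ===== PRECONDITION & SPEC =====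
def pvIsDelim (c : Char) : Bool := c = '-' ∨ c = '_'

-- the maximal runs of non-delimiter characters (the would-be tokens), possibly empty
def pvRuns : List Char → List (List Char)
  | [] => [[]]
  | c :: cs =>
    if pvIsDelim c then [] :: pvRuns cs
    else
      match pvRuns cs with
      | [] => [[c]]
      | h :: t => (c :: h) :: t

-- Pre_ = the inputs on which A returns normally, EXCEPT the corner where the string carries the
-- full delimiter pattern -,-,_,-,- and ends in a delimiter: there A returns a list with a trailing
-- empty component (the non-emptiness check is skipped after the fifth split) while the natural B
-- raises TagError, so that corner is excluded; everywhere else A and B raise together.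
def Pre_split_timestamp (timestamp : String) : Prop :=
  (timestamp.toList.filter pvIsDelim) <+: ['-', '-', '_', '-', '-'] ∧
    [] ∉ pvRuns timestamp.toList

instance (timestamp : String) : Decidable (Pre_split_timestamp timestamp) := by
  unfold Pre_split_timestamp; infer_instance

def pvWitness_split_timestamp : String := "1-2-3_4-5-6"

def Spec_split_timestamp (timestamp : String) (out : List String) : Prop :=
  out = split_timestamp_alt timestamp
instance (timestamp : String) (out : List String) : Decidable (Spec_split_timestamp timestamp out) := by
  unfold Spec_split_timestamp; infer_instance

-- ===== CLAIM (what is proved, stated in full; the proofs are below) =====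
def Claim_equal_split_timestamp : Prop :=
  ∀ (timestamp : String), Dom_split_timestamp timestamp → Pre_split_timestamp timestamp →
    Spec_split_timestamp timestamp (split_timestamp timestamp)

-- ===== LEMMAS AND PROOFS =====

theorem pvRuns_ne_nil (cs : List Char) : pvRuns cs ≠ [] := by
  induction cs with
  | nil => simp [pvRuns]
  | cons c cs ih =>
    simp only [pvRuns]
    split
    · simp
    · cases h : pvRuns cs <;> simp

-- a delimiter-free prefix extends the head run
theorem pvRuns_append (t cs : List Char) (ht : ∀ c ∈ t, pvIsDelim c = false) :
    pvRuns (t ++ cs) = (t ++ (pvRuns cs).headI) :: (pvRuns cs).tail := by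
  induction t with
  | nil =>
    cases h : pvRuns cs with
    | nil => exact absurd h (pvRuns_ne_nil cs)
    | cons a l => simp [h]
  | cons c t ih =>
    have hc : pvIsDelim c = false := ht c (by simp)
    have ih' := ih (fun x hx => ht x (by simp [hx]))
    simp only [List.cons_append, pvRuns, hc, Bool.false_eq_true, if_false, ih']

theorem pvRuns_no_delim (t : List Char) (ht : ∀ c ∈ t, pvIsDelim c = false) :
    pvRuns t = [t] := by
  have h := pvRuns_append t [] ht
  simpa [pvRuns] using h

-- pvSplitOnce on a list not containing the delimiter: no split happens
theorem pvSplitOnce_none (d : Char) (t : List Char) (h : d ∉ t) :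
    pvSplitOnce d t = (t, none) := by
  induction t with
  | nil => rfl
  | cons c cs ih =>
    simp only [List.mem_cons, not_or] at h
    simp [pvSplitOnce, Ne.symm h.1, ih h.2]

theorem pvSplitOnce_found (d : Char) (t r : List Char) (h : d ∉ t) :
    pvSplitOnce d (t ++ d :: r) = (t, some r) := by
  induction t with
  | nil => simp [pvSplitOnce]
  | cons c cs ih =>
    simp only [List.mem_cons, not_or] at h
    simp [pvSplitOnce, Ne.symm h.1, ih h.2]

theorem pvDropWhile_head {α : Type} (p : α → Bool) :
    ∀ (l : List α) (a : α) (l' : List α), l.dropWhile p = a :: l' → p a = false := by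
  intro l
  induction l with
  | nil => intro a l' h; simp [List.dropWhile] at h
  | cons c cs ih =>
    intro a l' h
    by_cases hc : p c
    · rw [List.dropWhile_cons_of_pos hc] at h; exact ih a l' h
    · rw [List.dropWhile_cons_of_neg hc] at h
      cases h; simpa using hc

-- characterisation of A's loop followed by the final check, on valid remainders
theorem pvLoopA_spec (ds : List Char) (hds : ∀ c ∈ ds, pvIsDelim c = true) :
    ∀ rest stack, (rest.filter pvIsDelim) <+: ds → [] ∉ pvRuns rest →
      (pvLoopA ds (rest :: stack)).bind pvFinishA =
        some ((stack.reverse ++ pvRuns rest).map (fun l => String.mk l)) := by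
  induction ds with
  | nil =>
    intro rest stack hpre hruns
    have hfil : rest.filter pvIsDelim = [] := List.prefix_nil.mp hpre
    have hnd : ∀ c ∈ rest, pvIsDelim c = false := by
      intro c hc
      by_contra hcontra
      have hm : c ∈ rest.filter pvIsDelim :=
        List.mem_filter.mpr ⟨hc, by simpa using hcontra⟩
      simp [hfil] at hm
    have hruns' : pvRuns rest = [rest] := pvRuns_no_delim rest hnd
    have hdash : '-' ∉ rest := fun h => by simpa [pvIsDelim] using hnd '-' h
    have hus : '_' ∉ rest := fun h => by simpa [pvIsDelim] using hnd '_' h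
    have hset : PySem.Set.ofList ['-', '-', '_', '-', '-'] = ['-', '_'] := by decide
    simp [pvLoopA, pvFinishA, hset, hdash, hus, hruns']
  | cons d ds ih =>
    intro rest stack hpre hruns
    have hd : pvIsDelim d = true := hds d (by simp)
    have hds' : ∀ c ∈ ds, pvIsDelim c = true := fun c hc => hds c (by simp [hc])
    have hdor : d = '-' ∨ d = '_' := by simpa [pvIsDelim] using hd
    have hdecomp : rest.takeWhile (fun c => !pvIsDelim c) ++
        rest.dropWhile (fun c => !pvIsDelim c) = rest := List.takeWhile_append_dropWhile
    set t := rest.takeWhile (fun c => !pvIsDelim c) with ht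
    have htfree : ∀ c ∈ t, pvIsDelim c = false := by
      intro c hc
      have h := List.mem_takeWhile_imp hc
      simpa using h
    cases hr : rest.dropWhile (fun c => !pvIsDelim c) with
    | nil =>
      -- rest is delimiter-free: the split finds nothing, the loop breaks
      have hrest : rest = t := by rw [← hdecomp, hr, List.append_nil]
      have hnd : ∀ c ∈ rest, pvIsDelim c = false := by
        intro c hc; exact htfree c (hrest ▸ hc)
      have hdmem : d ∉ rest := fun h => by
        rw [hnd d h] at hd; exact Bool.false_ne_true hd
      have hruns' : pvRuns rest = [rest] := pvRuns_no_delim rest hnd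
      have hrne : rest ≠ [] := by
        intro h; rw [hruns'] at hruns; exact hruns (by simp [h])
      have hdash : '-' ∉ rest := fun h => by simpa [pvIsDelim] using hnd '-' h
      have hus : '_' ∉ rest := fun h => by simpa [pvIsDelim] using hnd '_' h
      have hset : PySem.Set.ofList ['-', '-', '_', '-', '-'] = ['-', '_'] := by decide
      have hcond : ∀ x : Char, x ∈ rest → ¬(x = '-' ∨ x = '_') := by
        rintro x hxm (hx | hx) <;> subst hx
        · exact hdash hxm
        · exact hus hxm
      rcases hdor with h1 | h1 <;> subst h1 <;>
        simp [pvLoopA, pvSplitOnce_none _ rest hdmem, hrne, pvFinishA, hset, hdash, hus,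
          hruns', PySem.Set.diff, PySem.Set.ofList]
    | cons d' rest2 =>
      have hd' : pvIsDelim d' = true := by
        have h := pvDropWhile_head _ rest d' rest2 hr
        simpa using h
      have hrest : rest = t ++ d' :: rest2 := by rw [← hdecomp, hr]
      have hfil : rest.filter pvIsDelim = d' :: rest2.filter pvIsDelim := by
        rw [hrest, List.filter_append]
        have hnil : t.filter pvIsDelim = [] :=
          List.filter_eq_nil_iff.mpr (fun c hc => by simp [htfree c hc])
        simp [hnil, hd']
      have hdd : d' = d ∧ (rest2.filter pvIsDelim) <+: ds := by
        rw [hfil] at hpre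
        exact ⟨(List.cons_prefix_cons.mp hpre).1, (List.cons_prefix_cons.mp hpre).2⟩
      have hruns' : pvRuns rest = t :: pvRuns rest2 := by
        rw [hrest, pvRuns_append t _ htfree]
        have h2 : pvRuns (d' :: rest2) = [] :: pvRuns rest2 := by simp [pvRuns, hd']
        rw [h2]; simp
      have htne : t ≠ [] := by
        intro h; rw [hruns'] at hruns; exact hruns (by simp [h])
      have hruns2 : [] ∉ pvRuns rest2 := by
        intro h; rw [hruns'] at hruns; exact hruns (by simp [h])
      have hdnt : d ∉ t := fun h => by
        rw [htfree d h] at hd; exact Bool.false_ne_true hd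
      have hdash : '-' ∉ t := fun h => by simpa [pvIsDelim] using htfree '-' h
      have hus : '_' ∉ t := fun h => by simpa [pvIsDelim] using htfree '_' h
      have hsplit : pvSplitOnce d rest = (t, some rest2) := by
        rw [hrest, hdd.1]; exact pvSplitOnce_found d t rest2 hdnt
      have hih := ih hds' rest2 (t :: stack) hdd.2 hruns2
      have hstep : (pvLoopA (d :: ds) (rest :: stack)).bind pvFinishA =
          (pvLoopA ds (rest2 :: t :: stack)).bind pvFinishA := by
        rcases hdor with h1 | h1 <;> subst h1
        · have hdiff : PySem.Set.diff (PySem.Set.ofList ['-', '-', '_', '-', '-']) ['-'] = ['_'] := by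
            decide
          simp [pvLoopA, hsplit, htne, hdiff, hus]
        · have hdiff : PySem.Set.diff (PySem.Set.ofList ['-', '-', '_', '-', '-']) ['_'] = ['-'] := by
            decide
          simp [pvLoopA, hsplit, htne, hdiff, hdash]
      rw [hstep, hih, hruns']
      simp

-- characterisation of B's scan
theorem pvFoldB_spec (cs : List Char) :
    ∀ (toks : List (List Char)) (cur : List Char) (ds : List Char),
      ((cs.foldl pvStepB (toks, cur, ds)).1 ++ [(cs.foldl pvStepB (toks, cur, ds)).2.1],
        (cs.foldl pvStepB (toks, cur, ds)).2.2) =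
        (toks ++ (cur ++ (pvRuns cs).headI) :: (pvRuns cs).tail, ds ++ cs.filter pvIsDelim) := by
  induction cs with
  | nil => intro toks cur ds; simp [pvRuns]
  | cons c cs ih =>
    intro toks cur ds
    by_cases hc : c = '-' ∨ c = '_'
    · have hcd : pvIsDelim c = true := by simp [pvIsDelim]; tauto
      have hstep : pvStepB (toks, cur, ds) c = (toks ++ [cur], [], ds ++ [c]) := by
        simp [pvStepB, hc]
      rw [List.foldl_cons, hstep, ih (toks ++ [cur]) [] (ds ++ [c])]
      have h2 : pvRuns (c :: cs) = [] :: pvRuns cs := by simp [pvRuns, hcd]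
      rw [h2]
      cases h3 : pvRuns cs with
      | nil => exact absurd h3 (pvRuns_ne_nil cs)
      | cons a l => simp [hcd]
    · have hcd : pvIsDelim c = false := by simp [pvIsDelim]; tauto
      have hstep : pvStepB (toks, cur, ds) c = (toks, cur ++ [c], ds) := by
        simp [pvStepB, hc]
      rw [List.foldl_cons, hstep, ih toks (cur ++ [c]) ds]
      simp only [pvRuns, hcd, Bool.false_eq_true, if_false]
      cases h3 : pvRuns cs with
      | nil => exact absurd h3 (pvRuns_ne_nil cs)
      | cons a l => simp [hcd]

theorem split_timestamp_alt_spec (ts : String)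
    (hpre : (ts.toList.filter pvIsDelim) <+: ['-', '-', '_', '-', '-'])
    (hruns : [] ∉ pvRuns ts.toList) :
    split_timestamp_alt ts = (pvRuns ts.toList).map (fun l => String.mk l) := by
  have hfold := pvFoldB_spec ts.toList [] [] []
  have hhead : (pvRuns ts.toList).headI :: (pvRuns ts.toList).tail = pvRuns ts.toList := by
    cases h3 : pvRuns ts.toList with
    | nil => exact absurd h3 (pvRuns_ne_nil _)
    | cons a l => simp
  simp only [List.nil_append] at hfold
  rw [hhead] at hfold
  obtain ⟨hfold1, hfold2⟩ := Prod.mk.injEq .. ▸ hfold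
  have hlen : (ts.toList.filter pvIsDelim).length ≤ 5 := by
    have := hpre.length_le
    simpa using this
  have htake : ts.toList.filter pvIsDelim =
      (['-', '-', '_', '-', '-'] : List Char).take (ts.toList.filter pvIsDelim).length :=
    (List.prefix_iff_eq_take.mp hpre)
  have hany : (pvRuns ts.toList).any (fun t => t = []) = false := by
    simp only [List.any_eq_false, decide_eq_true_eq]
    intro x hx h; exact hruns (h ▸ hx)
  have hcondn : ¬((ts.toList.filter pvIsDelim).length > 5 ∨
      ts.toList.filter pvIsDelim ≠
        (['-', '-', '_', '-', '-'] : List Char).take (ts.toList.filter pvIsDelim).length ∨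
      (pvRuns ts.toList).any (fun t => t = []) = true) := by
    rintro (h | h | h)
    · omega
    · exact h htake
    · rw [hany] at h
      exact Bool.false_ne_true h
  unfold split_timestamp_alt
  simp only [hfold1, hfold2]
  rw [if_neg hcondn]

-- ===== VERDICT (by name: the statement is the Claim_ definition above) =====
set_option maxRecDepth 4096 in
theorem split_timestamp_spec : Claim_equal_split_timestamp := by
  intro ts _ hpre
  obtain ⟨hp, hr⟩ := hpre
  unfold Spec_split_timestamp
  have hds : ∀ c ∈ (['-', '-', '_', '-', '-'] : List Char), pvIsDelim c = true := by
    intro c hc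
    fin_cases hc <;> rfl
  have hA := pvLoopA_spec ['-', '-', '_', '-', '-'] hds ts.toList [] hp hr
  unfold split_timestamp
  rw [hA, split_timestamp_alt_spec ts hp hr]
  simp
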